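-- pv_equiv track=rewrite | github.com/ExtendedAutonomic/palimpsest | orchestrator/place/interface.py | _sanitise_name
-- ===== SOURCE A (Python) =====
-- def _sanitise_name(name: str, empty_message: str = "You must give it a name.") -> str:
--     """Reject names that could break the place."""
--     forbidden = ["..", "/", "\\", "\x00", "[[", "]]", "|", "#"]
--     for pattern in forbidden:
--         if pattern in name:
--             raise ValueError("That name is not possible here.")
--     if name.startswith("."):
--         raise ValueError("That name is not possible here.")
--     if not name.strip():
--         raise ValueError(empty_message)
--     return name.strip()
-- ===== SOURCE B (Python) =====
-- def _sanitise_name(name: str, empty_message: str = "You must give it a name.") -> str: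
--     """Reject names that could break the place (single character-level pass)."""
--     bad = (
--         any(c in "/\\\x00|#" for c in name)
--         or any(a == b and a in ".[]" for a, b in zip(name, name[1:]))
--         or name.startswith(".")
--     )
--     if bad:
--         raise ValueError("That name is not possible here.")
--     stripped = name.strip()
--     if not stripped:
--         raise ValueError(empty_message)
--     return stripped
-- ===== Notes on version B (the rewrite author's own statement) =====
-- stated objective: alternative
-- what changed: Replaces the loop of eight independent substring scans with one character-level pass: single forbidden characters are detected by membership in a character set and the two-character tokens ('..', '[[', ']]') by scanning adjacent pairs via zip.
import Mathlib
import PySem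

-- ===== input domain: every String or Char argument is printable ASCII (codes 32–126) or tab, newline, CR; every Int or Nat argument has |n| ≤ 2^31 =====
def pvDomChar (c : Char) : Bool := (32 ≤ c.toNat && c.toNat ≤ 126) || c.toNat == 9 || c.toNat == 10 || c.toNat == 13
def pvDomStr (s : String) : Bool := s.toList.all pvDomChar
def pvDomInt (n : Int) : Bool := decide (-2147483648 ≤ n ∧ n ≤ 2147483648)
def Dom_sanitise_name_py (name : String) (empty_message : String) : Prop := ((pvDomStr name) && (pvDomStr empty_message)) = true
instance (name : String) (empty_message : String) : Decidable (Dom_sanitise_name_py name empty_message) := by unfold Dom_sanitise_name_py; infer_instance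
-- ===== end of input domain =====

-- B replaces A's loop of eight independent substring scans by one character-level pass
-- (char membership + adjacent-pair scan); same return value wherever A returns (see Pre_).

-- ===== PORT A =====
-- literal port of A: scan the forbidden-substring list, then the leading-dot check, then strip;
-- on each Python `raise ValueError` branch A returns no value — those inputs are outside Pre_,
-- and the port returns "" there.
def sanitise_name_py (name : String) (empty_message : String) : String :=
  if (["..", "/", "\\", "\x00", "[[", "]]", "|", "#"] : List String).any
      (fun pattern => PySem.Str.isIn pattern name) then ""
  else if PySem.Str.startswith name "." then ""
  else if PySem.Str.strip name = "" then ""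
  else PySem.Str.strip name

-- ===== PORT B =====
-- literal port of B: one pass over the characters (membership in the single-char forbidden set,
-- adjacent equal pairs from ".[]" via zip), then leading dot, then strip; "" on raise branches.
def sanitise_name_py_alt (name : String) (empty_message : String) : String :=
  if (name.toList.any fun c => c ∈ (['/', '\\', '\x00', '|', '#'] : List Char))
      || ((name.toList.zip name.toList.tail).any fun p => p.1 == p.2 && p.1 ∈ (['.', '[', ']'] : List Char))
      || PySem.Str.startswith name "." then ""
  else if PySem.Str.strip name = "" then ""
  else PySem.Str.strip name

-- ===== PRECONDITION & SPEC =====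
-- Pre_ is exactly the set of inputs on which the Python A returns normally (no ValueError):
-- no forbidden substring, no leading dot, and a non-whitespace name.
def Pre_sanitise_name_py (name : String) (empty_message : String) : Prop :=
  ((["..", "/", "\\", "\x00", "[[", "]]", "|", "#"] : List String).all
      fun p => !PySem.Str.isIn p name) = true
  ∧ PySem.Str.startswith name "." = false
  ∧ PySem.Str.strip name ≠ ""
instance (name : String) (empty_message : String) : Decidable (Pre_sanitise_name_py name empty_message) := by unfold Pre_sanitise_name_py; infer_instance

def pvWitness_sanitise_name_py : String × String := ("hello", "msg")

def Spec_sanitise_name_py (name : String) (empty_message : String) (out : String) : Prop := out = sanitise_name_py_alt name empty_message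
instance (name : String) (empty_message : String) (out : String) : Decidable (Spec_sanitise_name_py name empty_message out) := by unfold Spec_sanitise_name_py; infer_instance

-- ===== CLAIM (what is proved, stated in full; the proofs are below) =====
def Claim_equal_sanitise_name_py : Prop := ∀ (name : String) (empty_message : String), Dom_sanitise_name_py name empty_message → Pre_sanitise_name_py name empty_message → Spec_sanitise_name_py name empty_message (sanitise_name_py name empty_message)

-- ===== LEMMAS AND PROOFS =====

-- a substring absent as a string is absent as a char-list infix
theorem pv_notInfix {sub name : String} (h : PySem.Str.isIn sub name = false) :
    ¬ sub.toList <:+: name.toList :=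
  (PySem.Chars.isIn_eq_false_iff sub.toList name.toList).mp (by simpa using h)

-- an adjacent pair seen by `zip l l.tail` is a two-element infix of l
theorem pv_pair_infix {a b : Char} : ∀ {l : List Char}, (a, b) ∈ l.zip l.tail → [a, b] <:+: l
  | [], h => by simp at h
  | [_], h => by simp at h
  | x :: y :: ys, h => by
    simp only [List.tail_cons, List.zip_cons_cons, List.mem_cons, Prod.mk.injEq] at h
    rcases h with ⟨rfl, rfl⟩ | h
    · exact ⟨[], ys, rfl⟩
    · exact (pv_pair_infix (l := y :: ys) (by simpa using h)).trans
        (List.infix_cons (List.infix_refl _))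

-- ===== VERDICT (by name: the statement is the Claim_ definition above) =====
theorem sanitise_name_py_spec : Claim_equal_sanitise_name_py := by
  intro name empty_message _ hPre
  obtain ⟨hforb, hdot, hstrip⟩ := hPre
  simp only [List.all_cons, List.all_nil, Bool.and_eq_true, Bool.not_eq_true'] at hforb
  obtain ⟨hdd, hsl, hbs, hnul, hlb, hrb, hbar, hhash, -⟩ := hforb
  have hchar : (name.toList.any fun c => c ∈ (['/', '\\', '\x00', '|', '#'] : List Char)) = false := by
    rw [List.any_eq_false]
    intro c hc hmem
    simp only [List.mem_cons, List.not_mem_nil, or_false, decide_eq_true_eq] at hmem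
    have hin : [c] <:+: name.toList := (List.singleton_infix_iff c name.toList).mpr hc
    rcases hmem with rfl | rfl | rfl | rfl | rfl
    · exact pv_notInfix hsl hin
    · exact pv_notInfix hbs hin
    · exact pv_notInfix hnul hin
    · exact pv_notInfix hbar hin
    · exact pv_notInfix hhash hin
  have hpair : ((name.toList.zip name.toList.tail).any
      fun p => p.1 == p.2 && p.1 ∈ (['.', '[', ']'] : List Char)) = false := by
    rw [List.any_eq_false]
    intro p hp hmem
    obtain ⟨a, b⟩ := p
    simp only [beq_iff_eq, List.mem_cons, List.not_mem_nil, or_false, Bool.and_eq_true,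
      decide_eq_true_eq] at hmem
    obtain ⟨rfl, hmem⟩ := hmem
    have hin : [a, a] <:+: name.toList := pv_pair_infix hp
    rcases hmem with rfl | rfl | rfl
    · exact pv_notInfix hdd hin
    · exact pv_notInfix hlb hin
    · exact pv_notInfix hrb hin
  unfold Spec_sanitise_name_py sanitise_name_py sanitise_name_py_alt
  simp only [List.any_cons, List.any_nil, hdd, hsl, hbs, hnul, hlb, hrb, hbar, hhash,
    hchar, hpair, hdot, Bool.or_self, Bool.false_eq_true,
    if_false]
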